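-- pv_equiv track=rewrite | github.com/benchopt/benchmark_tsad | benchmark_utils/metrics.py | extract_anomaly_ranges
-- ===== SOURCE A (Python) =====
-- def extract_anomaly_ranges(labels: list[int]):
--     """
--     Extracts ranges of anomalies from a series of labels.
--
--     Parameters
--     ----------
--         labels : List[int]
--                 Series of labels where 1 indicates an
--                 anomaly and 0 indicates normal.
--
--     Returns
--     -------
--         ranges : List[Tuple[int, int]]
--                 Each tuple represents a range (start_index, end_index)
--                 where anomalies are present.
--     """
--     ranges = []
--     start = None
--
--     for i, label in enumerate(labels):
--         if label == 1 and start is None: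
--             start = i  # Start of a new anomaly range
--         elif label == 0 and start is not None:
--             ranges.append((start, i - 1))  # End of the current anomaly range
--             start = None
--
--     # Handle the case where the series ends with an anomaly
--     if start is not None:
--         ranges.append((start, len(labels) - 1))
--
--     return ranges
-- ===== SOURCE B (Python) =====
-- def extract_anomaly_ranges(labels: list[int]):
--     """Two-pointer skip scan: jump to each 1 that opens a range, then jump
--     past the next 0 to close it; no running Optional state, no post-loop fixup."""
--     n = len(labels)
--     ranges = []
--     i = 0
--     while i < n:
--         if labels[i] == 1:
--             j = i + 1
--             while j < n and labels[j] != 0: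
--                 j += 1
--             ranges.append((i, j - 1))
--             i = j + 1
--         else:
--             i += 1
--     return ranges
-- ===== Notes on version B (the rewrite author's own statement) =====
-- stated objective: alternative
-- what changed: Replaces the single enumerate loop with an Optional start state plus post-loop cleanup by a two-pointer skip scan: the outer pointer jumps to each 1 that opens a range, an inner pointer jumps past the next 0 to close it, so no Optional state and no trailing-anomaly fixup are needed.
import Mathlib
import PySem

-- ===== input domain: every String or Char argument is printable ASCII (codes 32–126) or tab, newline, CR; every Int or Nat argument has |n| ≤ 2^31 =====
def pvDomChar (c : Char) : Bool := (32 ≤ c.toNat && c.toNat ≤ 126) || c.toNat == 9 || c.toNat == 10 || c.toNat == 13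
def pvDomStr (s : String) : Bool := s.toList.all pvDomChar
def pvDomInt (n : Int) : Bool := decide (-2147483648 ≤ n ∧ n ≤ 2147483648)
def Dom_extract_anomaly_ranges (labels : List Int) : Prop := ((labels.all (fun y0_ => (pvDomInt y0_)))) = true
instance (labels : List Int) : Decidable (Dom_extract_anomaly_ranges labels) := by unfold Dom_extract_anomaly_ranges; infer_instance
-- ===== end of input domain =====

-- B replaces A's running Optional-start state and post-loop cleanup by a two-pointer skip scan (alternative decomposition, same O(n) cost).

-- ===== PORT A =====
-- loop state: (ranges, start, i); `for i, label in enumerate(labels)` carries i in the fold state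
def pvAStep (st : List (Int × Int) × Option Int × Int) (label : Int) :
    List (Int × Int) × Option Int × Int :=
  match st with
  | (ranges, start, i) =>
    if label = 1 ∧ start = none then (ranges, some i, i + 1)
    else if label = 0 ∧ start ≠ none then (ranges ++ [(start.getD 0, i - 1)], none, i + 1)
    else (ranges, start, i + 1)

def extract_anomaly_ranges (labels : List Int) : List (Int × Int) :=
  match labels.foldl pvAStep ([], none, 0) with
  | (ranges, start, _) =>
    match start with
    | some s => ranges ++ [(s, (labels.length : Int) - 1)]
    | none => ranges

-- ===== PORT B =====
-- inner while loop: advance j past the non-zero tail (labels[j] is in range, so getD is exact)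
def pvBInner (labels : List Int) (j : Nat) : Nat :=
  if h : j < labels.length ∧ labels.getD j 0 ≠ 0 then pvBInner labels (j + 1) else j
termination_by labels.length - j
decreasing_by omega

-- the outer while loop needs j ≥ its starting point for termination; cited in decreasing_by
theorem pvBInner_ge (labels : List Int) (j : Nat) : j ≤ pvBInner labels j := by
  unfold pvBInner
  split
  next h => have ih := pvBInner_ge labels (j + 1); omega
  next => exact Nat.le_refl j
termination_by labels.length - j
decreasing_by omega

-- outer while loop: jump to each 1, close the range after the next 0
def pvBOuter (labels : List Int) (i : Nat) : List (Int × Int) :=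
  if h : i < labels.length then
    if labels.getD i 0 = 1 then
      ((i : Int), (pvBInner labels (i + 1) : Int) - 1) :: pvBOuter labels (pvBInner labels (i + 1) + 1)
    else pvBOuter labels (i + 1)
  else []
termination_by labels.length - i
decreasing_by
  · have := pvBInner_ge labels (i + 1); omega
  · omega

def extract_anomaly_ranges_alt (labels : List Int) : List (Int × Int) :=
  pvBOuter labels 0

-- ===== PRECONDITION & SPEC =====
def Spec_extract_anomaly_ranges (labels : List Int) (out : List (Int × Int)) : Prop := out = extract_anomaly_ranges_alt labels
instance (labels : List Int) (out : List (Int × Int)) : Decidable (Spec_extract_anomaly_ranges labels out) := by unfold Spec_extract_anomaly_ranges; infer_instance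

-- ===== CLAIM (what is proved, stated in full; the proofs are below) =====
def Claim_equal_extract_anomaly_ranges : Prop := ∀ (labels : List Int), Dom_extract_anomaly_ranges labels → Spec_extract_anomaly_ranges labels (extract_anomaly_ranges labels)

-- ===== LEMMAS AND PROOFS =====

-- recursive characterisation of A's fold (index i as Nat, start as the stored Int)
def pvGoA (i : Nat) (s : Option Int) (xs : List Int) : List (Int × Int) :=
  match xs with
  | [] =>
    match s with
    | some st => [(st, (i : Int) - 1)]
    | none => []
  | x :: xs' =>
    if x = 1 ∧ s = none then pvGoA (i + 1) (some (i : Int)) xs'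
    else if x = 0 ∧ s ≠ none then (s.getD 0, (i : Int) - 1) :: pvGoA (i + 1) none xs'
    else pvGoA (i + 1) s xs'

theorem pvA_bridge (xs : List Int) (acc : List (Int × Int)) (s : Option Int) (i : Nat) :
    (match List.foldl pvAStep (acc, s, (i : Int)) xs with
     | (r, some st, i') => r ++ [(st, i' - 1)]
     | (r, none, _) => r) = acc ++ pvGoA i s xs := by
  induction xs generalizing acc s i with
  | nil => cases s <;> simp [pvGoA]
  | cons x xs ih =>
    have hcast : ((i : Int) + 1) = ((i + 1 : Nat) : Int) := by push_cast; ring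
    cases s with
    | none =>
      by_cases hx : x = 1
      · have hstep : pvAStep (acc, none, (i : Int)) x = (acc, some (i : Int), (i : Int) + 1) := by
          simp [pvAStep, hx]
        have hgo : pvGoA i none (x :: xs) = pvGoA (i + 1) (some (i : Int)) xs := by
          simp [pvGoA, hx]
        rw [List.foldl_cons, hstep, hcast, ih, hgo]
      · have hstep : pvAStep (acc, none, (i : Int)) x = (acc, none, (i : Int) + 1) := by
          simp [pvAStep, hx]
        have hgo : pvGoA i none (x :: xs) = pvGoA (i + 1) none xs := by
          simp [pvGoA, hx]
        rw [List.foldl_cons, hstep, hcast, ih, hgo]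
    | some st =>
      by_cases hx : x = 0
      · have hstep : pvAStep (acc, some st, (i : Int)) x
            = (acc ++ [(st, (i : Int) - 1)], none, (i : Int) + 1) := by
          simp [pvAStep, hx]
        have hgo : pvGoA i (some st) (x :: xs)
            = (st, (i : Int) - 1) :: pvGoA (i + 1) none xs := by
          simp [pvGoA, hx]
        rw [List.foldl_cons, hstep, hcast, ih, hgo]
        simp
      · have hstep : pvAStep (acc, some st, (i : Int)) x = (acc, some st, (i : Int) + 1) := by
          simp [pvAStep, hx]
        have hgo : pvGoA i (some st) (x :: xs) = pvGoA (i + 1) (some st) xs := by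
          simp [pvGoA, hx]
        rw [List.foldl_cons, hstep, hcast, ih, hgo]

theorem pvA_len (xs : List Int) (acc : List (Int × Int)) (s : Option Int) (i : Int) :
    (List.foldl pvAStep (acc, s, i) xs).2.2 = i + xs.length := by
  induction xs generalizing acc s i with
  | nil => simp
  | cons x xs ih =>
    have h : ∀ st : List (Int × Int) × Option Int × Int,
        (pvAStep st x).2.2 = st.2.2 + 1 := by
      intro st
      rcases st with ⟨r, s', j⟩
      simp only [pvAStep]
      split_ifs <;> rfl
    rw [List.foldl_cons]
    rw [ih]
    rw [h (acc, s, i)]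
    simp only [List.length_cons]
    push_cast
    ring

theorem pvA_eq_goA (labels : List Int) :
    extract_anomaly_ranges labels = pvGoA 0 none labels := by
  have hb := pvA_bridge labels [] none 0
  have hl := pvA_len labels [] none 0
  simp only [Nat.cast_zero] at hb
  unfold extract_anomaly_ranges
  rcases hfold : List.foldl pvAStep ([], none, (0 : Int)) labels with ⟨r, s', i'⟩
  rw [hfold] at hb hl
  simp only at hl
  cases s' with
  | none => simpa using hb
  | some st =>
    simp only [List.nil_append] at hb ⊢
    rw [← hb]
    have : i' = (labels.length : Int) := by omega
    rw [this]

-- unfolding equations for the B-side loops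
theorem pvBInner_stop (labels : List Int) (j : Nat) (h : ¬ (j < labels.length ∧ labels.getD j 0 ≠ 0)) :
    pvBInner labels j = j := by
  rw [pvBInner, dif_neg h]

theorem pvBInner_step (labels : List Int) (j : Nat) (h : j < labels.length ∧ labels.getD j 0 ≠ 0) :
    pvBInner labels j = pvBInner labels (j + 1) := by
  conv_lhs => rw [pvBInner]
  rw [dif_pos h]

theorem pvBOuter_stop (labels : List Int) (i : Nat) (h : ¬ i < labels.length) :
    pvBOuter labels i = [] := by
  rw [pvBOuter, dif_neg h]

theorem pvBOuter_one (labels : List Int) (i : Nat) (h : i < labels.length)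
    (h1 : labels.getD i 0 = 1) :
    pvBOuter labels i
      = ((i : Int), (pvBInner labels (i + 1) : Int) - 1)
          :: pvBOuter labels (pvBInner labels (i + 1) + 1) := by
  conv_lhs => rw [pvBOuter]
  rw [dif_pos h, if_pos h1]

theorem pvBOuter_skip (labels : List Int) (i : Nat) (h : i < labels.length)
    (h1 : labels.getD i 0 ≠ 1) :
    pvBOuter labels i = pvBOuter labels (i + 1) := by
  conv_lhs => rw [pvBOuter]
  rw [dif_pos h, if_neg h1]

-- the main correspondence, by induction on the fuel k ≥ labels.length - i
theorem pvMain (labels : List Int) (k : Nat) :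
    ∀ i : Nat, labels.length - i ≤ k →
      (pvGoA i none (labels.drop i) = pvBOuter labels i ∧
       ∀ s : Int, pvGoA i (some s) (labels.drop i) =
         (s, (pvBInner labels i : Int) - 1) :: pvBOuter labels (pvBInner labels i + 1)) := by
  induction k with
  | zero =>
    intro i hk
    have hi : labels.length ≤ i := by omega
    have hdrop : labels.drop i = [] := List.drop_eq_nil_of_le hi
    have hinner : pvBInner labels i = i := pvBInner_stop labels i (by omega)
    refine ⟨?_, fun s => ?_⟩
    · rw [hdrop, pvBOuter_stop labels i (by omega)]
      simp [pvGoA]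
    · rw [hdrop, hinner, pvBOuter_stop labels (i + 1) (by omega)]
      simp [pvGoA]
  | succ k ih =>
    intro i hk
    by_cases hi : i < labels.length
    · have hdrop : labels.drop i = labels[i] :: labels.drop (i + 1) :=
        List.drop_eq_getElem_cons hi
      have hgd : labels.getD i 0 = labels[i] := List.getD_eq_getElem labels 0 hi
      have ih1 := ih (i + 1) (by omega)
      constructor
      · -- none-state
        rw [hdrop]
        by_cases hx : labels[i] = 1
        · have hgo : pvGoA i none (labels[i] :: labels.drop (i + 1))
              = pvGoA (i + 1) (some (i : Int)) (labels.drop (i + 1)) := by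
            simp [pvGoA, hx]
          rw [hgo, ih1.2 (i : Int), pvBOuter_one labels i hi (hgd.trans hx)]
        · have hgo : pvGoA i none (labels[i] :: labels.drop (i + 1))
              = pvGoA (i + 1) none (labels.drop (i + 1)) := by
            simp [pvGoA, hx]
          rw [hgo, ih1.1, pvBOuter_skip labels i hi (by rw [hgd]; exact hx)]
      · -- some-state
        intro s
        rw [hdrop]
        by_cases hx : labels[i] = 0
        · have hgo : pvGoA i (some s) (labels[i] :: labels.drop (i + 1))
              = (s, (i : Int) - 1) :: pvGoA (i + 1) none (labels.drop (i + 1)) := by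
            simp [pvGoA, hx]
          have hinner : pvBInner labels i = i :=
            pvBInner_stop labels i (by rw [hgd, hx]; simp)
          rw [hgo, ih1.1, hinner]
        · have hgo : pvGoA i (some s) (labels[i] :: labels.drop (i + 1))
              = pvGoA (i + 1) (some s) (labels.drop (i + 1)) := by
            simp [pvGoA, hx]
          have hinner : pvBInner labels i = pvBInner labels (i + 1) :=
            pvBInner_step labels i ⟨hi, by rw [hgd]; exact hx⟩
          rw [hgo, ih1.2 s, hinner]
    · exact ih i (by omega)

-- ===== VERDICT (by name: the statement is the Claim_ definition above) =====
theorem extract_anomaly_ranges_spec : Claim_equal_extract_anomaly_ranges := by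
  intro labels _
  show extract_anomaly_ranges labels = extract_anomaly_ranges_alt labels
  rw [pvA_eq_goA]
  have h := (pvMain labels labels.length 0 (by omega)).1
  simpa [extract_anomaly_ranges_alt] using h
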